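-- pv_equiv track=rewrite | github.com/taeyekim/codingTest | 프로그래머스/0/120921. 문자열 밀기/문자열 밀기.py | solution
-- ===== SOURCE A (Python) =====
-- def solution(A, B):
--     cnt = 0
--     for _ in range(len(A)):
--         if A == B:
--             return cnt
--         else:
--             A = A[-1] + A[:-1]
--             cnt += 1
--     else:
--         return -1
-- ===== SOURCE B (Python) =====
-- def solution(A, B):
--     if len(A) != len(B):
--         return -1
--     return (B + B).find(A)
-- ===== Notes on version B (the rewrite author's own statement) =====
-- stated objective: faster
-- what changed: Instead of rotating A one step at a time and comparing (a Python-level loop building n new strings), B uses the cyclic-string fact that A right-rotated k times equals B iff A occurs at offset k in B+B, so it is a single length check plus one (B+B).find(A) call.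
-- intended difference: On the single input A = B = '' A's for/else loop body never runs so A returns -1, while B returns 0, which is the intended answer since zero rotations already make the strings equal. — e.g. on solution("", ""): A returns -1, B returns 0
import Mathlib
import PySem

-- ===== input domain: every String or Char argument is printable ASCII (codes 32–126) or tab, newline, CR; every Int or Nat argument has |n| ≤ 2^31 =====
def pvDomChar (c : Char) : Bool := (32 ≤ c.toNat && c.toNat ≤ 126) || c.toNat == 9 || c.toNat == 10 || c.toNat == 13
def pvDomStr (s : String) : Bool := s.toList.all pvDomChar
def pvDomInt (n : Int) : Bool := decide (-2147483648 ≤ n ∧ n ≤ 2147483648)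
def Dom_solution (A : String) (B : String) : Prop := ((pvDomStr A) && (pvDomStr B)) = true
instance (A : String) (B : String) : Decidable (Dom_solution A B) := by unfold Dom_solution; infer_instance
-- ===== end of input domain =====

-- B replaces A's Python-level rotate-and-compare loop by a single substring search in B+B
-- (A right-rotated k times equals B iff A occurs at offset k in B+B); objective: faster.


-- ===== PORT A =====
-- A = A[-1] + A[:-1]  (right rotation by one). The 'none' branch is Python's IndexError on
-- A[-1]; it is unreachable because the loop body only runs when the string is nonempty.
def rotA (s : List Char) : List Char :=
  match PySem.List.pyGet? s (-1) with
  | some c => c :: PySem.List.slice s none (some (-1))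
  | none => []

-- the 'for _ in range(len(A))' loop with early return; fuel = remaining iterations
def solGo (b : List Char) (s : List Char) (cnt : Int) : Nat → Int
  | 0 => -1
  | f + 1 => if s = b then cnt else solGo b (rotA s) (cnt + 1) f

def solution (A : String) (B : String) : Int :=
  solGo B.toList A.toList 0 A.toList.length

-- ===== PORT B =====
def solution_alt (A : String) (B : String) : Int :=
  if A.toList.length ≠ B.toList.length then -1
  else PySem.Chars.find (B.toList ++ B.toList) A.toList

-- ===== PRECONDITION & SPEC =====
-- On the single input A = B = '' A's for/else loop body never runs so A returns -1, while
-- B returns 0, which is the intended answer: zero rotations already make the strings equal.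
def D_solution (A : String) (B : String) : Prop := A = "" ∧ B = ""
instance (A : String) (B : String) : Decidable (D_solution A B) := by unfold D_solution; infer_instance

def Spec_solution (A : String) (B : String) (out : Int) : Prop :=
  ¬ D_solution A B → out = solution_alt A B
instance (A : String) (B : String) (out : Int) : Decidable (Spec_solution A B out) := by unfold Spec_solution; infer_instance

def pvDiffWitness_solution : String × String := ("", "")
def pvDiffWitnessOut_solution : Int × Int := (-1, 0)

-- ===== CLAIM (what is proved, stated in full; the proofs are below) =====
def Claim_unchanged_solution : Prop := ∀ (A : String) (B : String), Dom_solution A B → Spec_solution A B (solution A B)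
def Claim_changed_solution : Prop := Dom_solution (pvDiffWitness_solution.1) (pvDiffWitness_solution.2) ∧ D_solution (pvDiffWitness_solution.1) (pvDiffWitness_solution.2) ∧ solution (pvDiffWitness_solution.1) (pvDiffWitness_solution.2) = pvDiffWitnessOut_solution.1 ∧ solution_alt (pvDiffWitness_solution.1) (pvDiffWitness_solution.2) = pvDiffWitnessOut_solution.2 ∧ pvDiffWitnessOut_solution.1 ≠ pvDiffWitnessOut_solution.2
def Claim_exact_solution : Prop := ∀ (A : String) (B : String), Dom_solution A B → D_solution A B → solution A B ≠ solution_alt A B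

-- ===== LEMMAS AND PROOFS =====

-- proof-only helpers: the i-th iterate of rotA, and the loop state after k rotations
def iterRot (s : List Char) : Nat → List Char
  | 0 => s
  | i + 1 => iterRot (rotA s) i

-- state of A's loop after k right rotations of a (for k ≤ a.length)
def seg (a : List Char) (k : Nat) : List Char :=
  a.drop (a.length - k) ++ a.take (a.length - k)

theorem rotA_eq (s : List Char) (h : s ≠ []) :
    rotA s = s.getLast h :: s.dropLast := by
  have hl : 1 ≤ s.length := List.length_pos_of_ne_nil h
  unfold rotA
  simp only [PySem.List.pyGet?, PySem.List.pyIdx?, Int.reduceNeg, Int.neg_nonneg, Int.reduceLE,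
    ↓reduceIte, neg_le_neg_iff, Nat.one_le_cast, neg_neg, Int.toNat_one, hl,
    PySem.List.slice_to_neg_one]
  rw [Option.bind_some, List.getElem?_eq_getElem (by omega)]
  simp [List.getLast_eq_getElem]

theorem rotA_length (s : List Char) : (rotA s).length = s.length := by
  rcases eq_or_ne s [] with rfl | h
  · rfl
  · rw [rotA_eq s h]
    have := List.length_pos_of_ne_nil h
    simp; omega

theorem solGo_of_ne_length (b : List Char) (f : Nat) :
    ∀ (s : List Char) (cnt : Int), s.length ≠ b.length → solGo b s cnt f = -1 := by
  induction f with
  | zero => intro s cnt h; rfl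
  | succ f ih =>
    intro s cnt h
    rw [solGo, if_neg (fun hc => h (by rw [hc]))]
    exact ih _ _ (by rw [rotA_length]; exact h)

theorem solGo_none (b : List Char) (f : Nat) :
    ∀ (s : List Char) (cnt : Int), (∀ i < f, iterRot s i ≠ b) → solGo b s cnt f = -1 := by
  induction f with
  | zero => intro s cnt _; rfl
  | succ f ih =>
    intro s cnt h
    have h0 : s ≠ b := by simpa [iterRot] using h 0 (Nat.succ_pos f)
    rw [solGo, if_neg h0]
    exact ih _ _ (fun i hi => by simpa [iterRot] using h (i+1) (by omega))

theorem solGo_some (b : List Char) (f : Nat) :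
    ∀ (s : List Char) (cnt : Int) (i : Nat), i < f → iterRot s i = b →
      (∀ j < i, iterRot s j ≠ b) → solGo b s cnt f = cnt + i := by
  induction f with
  | zero => intro s cnt i hi; omega
  | succ f ih =>
    intro s cnt i hi heq hmin
    match i with
    | 0 =>
      rw [solGo, if_pos (by simpa [iterRot] using heq)]; simp
    | i + 1 =>
      have h0 : s ≠ b := by simpa [iterRot] using hmin 0 (Nat.succ_pos i)
      rw [solGo, if_neg h0]
      have := ih (rotA s) (cnt + 1) i (by omega) (by simpa [iterRot] using heq)
        (fun j hj => by simpa [iterRot] using hmin (j+1) (by omega))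
      rw [this]; push_cast; ring

theorem iterRot_succ (i : Nat) : ∀ s : List Char, iterRot s (i + 1) = rotA (iterRot s i) := by
  induction i with
  | zero => intro s; rfl
  | succ i ih => intro s; rw [iterRot, ih (rotA s)]; rfl

theorem rotA_snoc (ys : List Char) (c : Char) : rotA (ys ++ [c]) = c :: ys := by
  rw [rotA_eq _ (by simp)]
  simp

theorem rotA_seg (a : List Char) (k : Nat) (hk : k < a.length) :
    rotA (seg a k) = seg a (k + 1) := by
  set n := a.length with hn
  set m := n - k with hm
  have hm1 : 1 ≤ m := by omega
  have hmn : m ≤ n := by omega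
  have hsplit : a.take m = a.take (m-1) ++ [a[m-1]'(by omega)] := by
    conv_lhs => rw [show m = (m-1)+1 from by omega]
    rw [List.take_concat_get' a (m-1) (by omega)]
  have hdrop : a.drop (m-1) = a[m-1]'(by omega) :: a.drop m := by
    rw [List.drop_eq_getElem_cons (by omega)]
    congr 2; omega
  unfold seg
  rw [← hm, ← hn]
  have hd : n - (k+1) = m - 1 := by omega
  rw [hd, hsplit, ← List.append_assoc, rotA_snoc, hdrop, List.cons_append]

theorem iterRot_seg (a : List Char) (k : Nat) (hk : k ≤ a.length) :
    iterRot a k = seg a k := by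
  induction k with
  | zero => simp [iterRot, seg]
  | succ k ih =>
    rw [iterRot_succ, ih (by omega), rotA_seg a k (by omega)]

-- occurrence of a at offset j in b ++ b  ↔  j right rotations of a give b
theorem seg_iff_occ (a b : List Char) (n : Nat) (ha : a.length = n) (hb : b.length = n)
    (j : Nat) (hj : j ≤ n) :
    seg a j = b ↔ a <+: (b ++ b).drop j := by
  have hdl : (b.drop j).length = n - j := by simp [hb]
  have hbb : (b ++ b).drop j = b.drop j ++ b :=
    List.drop_append_of_le_length (by omega)
  constructor
  · intro h
    have hadl : (a.drop (n - j)).length = j := by simp [ha]; omega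
    rw [hbb, ← h]
    unfold seg
    rw [ha]
    rw [List.drop_append_of_le_length (by simp [ha]; omega)]
    have : (a.drop (n-j)).drop j = [] := by
      apply List.eq_nil_of_length_eq_zero; simp [ha]; omega
    rw [this, List.nil_append]
    calc a = a.take (n-j) ++ a.drop (n-j) := (List.take_append_drop _ _).symm
      _ <+: a.take (n-j) ++ (a.drop (n-j) ++ a.take (n-j)) := by
            rw [← List.append_assoc]
            exact (List.take_append_drop _ _ ▸ List.prefix_append _ _)
  · intro h
    rw [hbb] at h
    have ha' : a = b.drop j ++ b.take j := by
      have := List.prefix_iff_eq_take.mp h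
      rw [this, ha, List.take_append]
      congr 1
      · exact List.take_of_length_le (by omega)
      · congr 1; omega
    unfold seg
    rw [ha']
    have h1 : (b.drop j ++ b.take j).length = n := by simp [hb]; omega
    have hlen : n - j = (b.drop j).length := by omega
    rw [h1, hlen, List.drop_left, List.take_left, List.take_append_drop]

theorem main_eq (A B : String) (hD : ¬ (A = "" ∧ B = "")) :
    solGo B.toList A.toList 0 A.toList.length =
      (if A.toList.length ≠ B.toList.length then (-1 : Int)
       else PySem.Chars.find (B.toList ++ B.toList) A.toList) := by
  set a := A.toList with hA
  set b := B.toList with hB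
  by_cases hlen : a.length = b.length
  · rw [if_neg (by omega)]
    set n := a.length with hn
    have hn1 : 1 ≤ n := by
      rcases Nat.eq_zero_or_pos n with h0 | h
      · exfalso
        have ha0 : a = [] := List.eq_nil_of_length_eq_zero (by omega)
        have hb0 : b = [] := List.eq_nil_of_length_eq_zero (by omega)
        exact hD ⟨String.toList_eq_nil_iff.mp (by rw [← hA]; exact ha0),
          String.toList_eq_nil_iff.mp (by rw [← hB]; exact hb0)⟩
      · exact h
    set F := PySem.Chars.find (b ++ b) a with hF
    by_cases hFneg : F = -1
    · have hinf : ¬ a <:+: (b ++ b) := (PySem.Chars.find_eq_neg_one_iff _ _).mp hFneg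
      rw [hFneg]
      apply solGo_none
      intro i hi hcon
      apply hinf
      rw [iterRot_seg a i (by omega)] at hcon
      have hocc := (seg_iff_occ a b n rfl (by omega) i (by omega)).mp hcon
      exact hocc.isInfix.trans (List.drop_suffix i (b ++ b)).isInfix
    · have h0 : 0 ≤ F := by
        have := PySem.Chars.neg_one_le_find (b ++ b) a
        omega
      obtain ⟨hpre, hmin⟩ := PySem.Chars.find_spec h0
      set j := F.toNat with hj
      have hjle : j ≤ n := by
        have h1 := hpre.length_le
        simp only [List.length_drop, List.length_append] at h1
        omega
      have hjlt : j < n := by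
        rcases Nat.lt_or_ge j n with h | h
        · exact h
        · exfalso
          have hjn : j = n := by omega
          have hab : a = b := by
            have := (seg_iff_occ a b n rfl (by omega) j (by omega)).mpr hpre
            rw [hjn] at this
            unfold seg at this
            rw [show a.length - n = 0 from by omega] at this
            simpa using this
          have hocc0 : a <+: (b ++ b).drop 0 := by
            apply (seg_iff_occ a b n rfl (by omega) 0 (by omega)).mp
            simpa [seg] using hab
          exact hmin 0 (by omega) hocc0
      have hiter : iterRot a j = b := by
        rw [iterRot_seg a j (by omega)]
        exact (seg_iff_occ a b n rfl (by omega) j (by omega)).mpr hpre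
      have hminit : ∀ i < j, iterRot a i ≠ b := by
        intro i hi hcon
        rw [iterRot_seg a i (by omega)] at hcon
        exact hmin i hi ((seg_iff_occ a b n rfl (by omega) i (by omega)).mp hcon)
      rw [solGo_some b n a 0 j (by omega) hiter hminit]
      omega
  · rw [if_pos (by omega)]
    exact solGo_of_ne_length b a.length a 0 hlen

-- ===== VERDICT (by name: the statement is the Claim_ definition above) =====
theorem solution_spec : Claim_unchanged_solution := by
  intro A B _ hD
  exact main_eq A B hD

theorem solution_changed : Claim_changed_solution := by
  unfold Claim_changed_solution; decide

theorem solution_tight : Claim_exact_solution := by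
  intro A B _ hD
  obtain ⟨h1, h2⟩ := hD; subst h1; subst h2; decide
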